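-- pv_equiv track=rewrite | github.com/gabrielegrillo/Fondamenti1-Unical | Lab2Gen.py | bombainquattrosettori
-- ===== SOURCE A (Python) =====
-- def bombainquattrosettori(matrice):
--     # Primo Settore
--     countbombe = 0
--     for i in range(len(matrice)):
--         for j in range(len(matrice[0])//3):
--             elemento = matrice[i][j]
--             if (elemento == 0):
--                 countbombe += 1
--     if (countbombe != 1):
--         return False
--
--     # Secondo Settore ()
--     countbombe = 0
--     for i in range(len(matrice)//2):
--         for j in range(len(matrice[0])//3, (len(matrice[0])//3)*2):
--             if (matrice[i][j] == 0):
--                 countbombe += 1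
--     if (countbombe != 1):
--         return False
--
--     countbombe = 0
--     for i in range(len(matrice)//2, len(matrice)):
--         for j in range(len(matrice[0])//3, (len(matrice[0])//3)*2):
--             if (matrice[i][j] == 0):
--                 countbombe += 1
--     if (countbombe != 1):
--         return False
--
--     countbombe = 0
--
--     for i in range(len(matrice)):
--         for j in range((len(matrice[0])//3)*2, len(matrice[0])):
--             if (matrice[i][j] == 0):
--                 countbombe += 1
--     if (countbombe != 1):
--         return False
--
--     return True
-- ===== SOURCE B (Python) =====
-- def bombainquattrosettori(matrice):
--     # single row-major pass maintaining four sector counters (return value only)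
--     if not matrice:
--         return False
--     n = len(matrice)
--     m = len(matrice[0])
--     t = m // 3
--     c1 = c2 = c3 = c4 = 0
--     for i, row in enumerate(matrice):
--         for j in range(m):
--             if row[j] == 0:
--                 if j < t:
--                     c1 += 1
--                 elif j < 2 * t:
--                     if i < n // 2:
--                         c2 += 1
--                     else:
--                         c3 += 1
--                 else:
--                     c4 += 1
--     return c1 == 1 and c2 == 1 and c3 == 1 and c4 == 1
-- ===== Notes on version B (the rewrite author's own statement) =====
-- stated objective: alternative
-- what changed: Replaced A's four sequential sector scans with early returns by one single row-major pass over the whole matrix that classifies each cell into its sector band and maintains four counters, comparing all four to 1 at the end.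
-- outside the precondition, e.g. on bombainquattrosettori([[1], []]): A returns False, B raises IndexError; on bombainquattrosettori([[1, 2, 3], [0]]): A returns False, B raises IndexError
import Mathlib
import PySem

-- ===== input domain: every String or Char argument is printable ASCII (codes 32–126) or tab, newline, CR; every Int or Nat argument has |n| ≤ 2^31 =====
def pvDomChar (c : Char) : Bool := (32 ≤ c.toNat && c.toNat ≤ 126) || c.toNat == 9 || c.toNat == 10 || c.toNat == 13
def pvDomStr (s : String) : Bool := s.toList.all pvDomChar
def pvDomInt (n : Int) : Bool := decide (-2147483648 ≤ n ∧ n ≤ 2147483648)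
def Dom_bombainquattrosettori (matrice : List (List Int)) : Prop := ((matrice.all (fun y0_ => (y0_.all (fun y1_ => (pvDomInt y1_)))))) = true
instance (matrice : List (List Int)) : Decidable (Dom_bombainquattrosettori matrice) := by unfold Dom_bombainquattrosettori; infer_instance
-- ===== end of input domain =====

-- B replaces A's four sequential sector scans (with early returns) by one single
-- row-major pass that classifies every cell into its sector band and maintains four
-- counters; same cost, different decomposition (objective: alternative).

-- ===== PORT A =====
-- A's four identically-shaped double loops, as one helper over a row-index list and a
-- column-index list (indices are the nonnegative Python range indices; getD's default
-- is only reachable outside Pre_).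
def pvSector (matrice : List (List Int)) (rows cols : List Nat) : Nat :=
  rows.foldl (fun acc i =>
    cols.foldl (fun a j => if (matrice.getD i []).getD j 1 = 0 then a + 1 else a) acc) 0

def bombainquattrosettori (matrice : List (List Int)) : Bool :=
  if pvSector matrice (List.range matrice.length)
      (List.range ((matrice.headD []).length / 3)) ≠ 1 then false
  else if pvSector matrice (List.range (matrice.length / 2))
      (List.range' ((matrice.headD []).length / 3) ((matrice.headD []).length / 3)) ≠ 1 then false
  else if pvSector matrice (List.range' (matrice.length / 2) (matrice.length - matrice.length / 2))
      (List.range' ((matrice.headD []).length / 3) ((matrice.headD []).length / 3)) ≠ 1 then false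
  else if pvSector matrice (List.range matrice.length)
      (List.range' (2 * ((matrice.headD []).length / 3))
        ((matrice.headD []).length - 2 * ((matrice.headD []).length / 3))) ≠ 1 then false
  else true

-- ===== PORT B =====
-- the body of B's inner loop: classify cell (i, j) and bump the matching counter
def pvStep (t : Nat) (n2 : Int) (i : Int) (row : List Int)
    (st : Nat × Nat × Nat × Nat) (j : Nat) : Nat × Nat × Nat × Nat :=
  if row.getD j 1 = 0 then
    if j < t then (st.1 + 1, st.2.1, st.2.2.1, st.2.2.2)
    else if j < 2 * t then
      if i < n2 then (st.1, st.2.1 + 1, st.2.2.1, st.2.2.2)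
      else (st.1, st.2.1, st.2.2.1 + 1, st.2.2.2)
    else (st.1, st.2.1, st.2.2.1, st.2.2.2 + 1)
  else st

def bombainquattrosettori_alt (matrice : List (List Int)) : Bool :=
  match matrice with
  | [] => false
  | _ :: _ =>
    let n := matrice.length
    let m := (matrice.headD []).length
    let t := m / 3
    let st := (PySem.List.enumerate matrice 0).foldl
      (fun st p => (List.range m).foldl (pvStep t ((n / 2 : Nat) : Int) p.1 p.2) st)
      ((0, 0, 0, 0) : Nat × Nat × Nat × Nat)
    st.1 == 1 && st.2.1 == 1 && st.2.2.1 == 1 && st.2.2.2 == 1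

-- ===== PRECONDITION & SPEC =====
-- Pre_ excludes ragged matrices whose later rows are shorter than row 0: there Python A
-- may return False via an early exit while Python B's full pass raises IndexError.
def Pre_bombainquattrosettori (matrice : List (List Int)) : Prop :=
  ∀ r ∈ matrice, (matrice.headD []).length ≤ r.length
instance (matrice : List (List Int)) : Decidable (Pre_bombainquattrosettori matrice) := by
  unfold Pre_bombainquattrosettori; infer_instance
def pvWitness_bombainquattrosettori : List (List Int) := [[1]]

def Spec_bombainquattrosettori (matrice : List (List Int)) (out : Bool) : Prop :=
  out = bombainquattrosettori_alt matrice
instance (matrice : List (List Int)) (out : Bool) : Decidable (Spec_bombainquattrosettori matrice out) := by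
  unfold Spec_bombainquattrosettori; infer_instance

-- ===== CLAIM (what is proved, stated in full; the proofs are below) =====
def Claim_equal_bombainquattrosettori : Prop := ∀ (matrice : List (List Int)), Dom_bombainquattrosettori matrice → Pre_bombainquattrosettori matrice → Spec_bombainquattrosettori matrice (bombainquattrosettori matrice)

-- ===== LEMMAS AND PROOFS =====

-- number of zeros a row shows at the columns of `cols`
def pvG (cols : List Nat) (row : List Int) : Nat :=
  cols.countP (fun j => row.getD j 1 == 0)

-- the common normal form: the four sector zero-counts, each compared with 1
def pvCore (matrice : List (List Int)) : Bool :=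
  ((matrice.map (pvG (List.range' 0 ((matrice.headD []).length / 3)))).sum == 1)
  && (((matrice.take (matrice.length / 2)).map
        (pvG (List.range' ((matrice.headD []).length / 3) ((matrice.headD []).length / 3)))).sum == 1)
  && (((matrice.drop (matrice.length / 2)).map
        (pvG (List.range' ((matrice.headD []).length / 3) ((matrice.headD []).length / 3)))).sum == 1)
  && ((matrice.map (pvG (List.range' (2 * ((matrice.headD []).length / 3))
        ((matrice.headD []).length - 2 * ((matrice.headD []).length / 3))))).sum == 1)

theorem pvG_cons_zero (j : Nat) (cols : List Nat) (row : List Int) (h : row.getD j 1 = 0) :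
    pvG (j :: cols) row = 1 + pvG cols row := by
  unfold pvG
  rw [List.countP_cons]
  simp only [h]
  norm_num [Nat.add_comm]

theorem pvG_cons_nonzero (j : Nat) (cols : List Nat) (row : List Int) (h : ¬ row.getD j 1 = 0) :
    pvG (j :: cols) row = pvG cols row := by
  unfold pvG
  rw [List.countP_cons, beq_eq_false_iff_ne.mpr h]
  norm_num

theorem pvInnerA (row : List Int) (cols : List Nat) (acc : Nat) :
    cols.foldl (fun a j => if row.getD j 1 = 0 then a + 1 else a) acc = acc + pvG cols row := by
  induction cols generalizing acc with
  | nil => simp [pvG]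
  | cons j cs ih =>
    rw [List.foldl_cons]
    by_cases h : row.getD j 1 = 0
    · rw [if_pos h, ih, pvG_cons_zero j cs row h]; omega
    · rw [if_neg h, ih, pvG_cons_nonzero j cs row h]

theorem pvSector_eq (matrice : List (List Int)) (rows cols : List Nat) :
    pvSector matrice rows cols = (rows.map (fun i => pvG cols (matrice.getD i []))).sum := by
  unfold pvSector
  suffices h : ∀ acc, rows.foldl (fun acc i =>
      cols.foldl (fun a j => if (matrice.getD i []).getD j 1 = 0 then a + 1 else a) acc) acc
      = acc + (rows.map (fun i => pvG cols (matrice.getD i []))).sum by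
    simpa using h 0
  induction rows with
  | nil => simp
  | cons r rs ih => intro acc; rw [List.foldl_cons, pvInnerA, ih]; simp; omega

theorem pvMapRange' (k : Nat) : ∀ (s : Nat) (xs : List (List Int)) (g : List Int → Nat),
    s + k ≤ xs.length →
    (List.range' s k).map (fun i => g (xs.getD i [])) = ((xs.drop s).take k).map g := by
  induction k with
  | zero => intro s xs g _; simp
  | succ k ih =>
    intro s xs g h
    have hs : s < xs.length := by omega
    rw [List.range'_succ, List.map_cons, List.drop_eq_getElem_cons hs, List.take_succ_cons,
      List.map_cons, List.getD_eq_getElem _ _ hs, ih (s + 1) xs g (by omega)]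

theorem pvA_norm (matrice : List (List Int)) : bombainquattrosettori matrice = pvCore matrice := by
  unfold bombainquattrosettori pvCore
  have h1 := pvMapRange' matrice.length 0 matrice (pvG (List.range' 0 ((matrice.headD []).length / 3))) (by omega)
  have h2 := pvMapRange' (matrice.length / 2) 0 matrice
    (pvG (List.range' ((matrice.headD []).length / 3) ((matrice.headD []).length / 3))) (by omega)
  have h3 := pvMapRange' (matrice.length - matrice.length / 2) (matrice.length / 2) matrice
    (pvG (List.range' ((matrice.headD []).length / 3) ((matrice.headD []).length / 3))) (by omega)
  have h4 := pvMapRange' matrice.length 0 matrice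
    (pvG (List.range' (2 * ((matrice.headD []).length / 3))
      ((matrice.headD []).length - 2 * ((matrice.headD []).length / 3)))) (by omega)
  simp only [List.drop_zero] at h1 h2 h3 h4
  simp only [pvSector_eq, List.range_eq_range']
  rw [h1, h2, h3, h4]
  have htake3 : (matrice.drop (matrice.length / 2)).take (matrice.length - matrice.length / 2)
      = matrice.drop (matrice.length / 2) := by
    apply List.take_of_length_le; simp
  rw [List.take_length, htake3]
  set a := (matrice.map (pvG (List.range' 0 ((matrice.headD []).length / 3)))).sum with ha
  set b := ((matrice.take (matrice.length / 2)).map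
      (pvG (List.range' ((matrice.headD []).length / 3) ((matrice.headD []).length / 3)))).sum with hb
  set c := ((matrice.drop (matrice.length / 2)).map
      (pvG (List.range' ((matrice.headD []).length / 3) ((matrice.headD []).length / 3)))).sum with hc
  set d := ((matrice.map (pvG (List.range' (2 * ((matrice.headD []).length / 3))
      ((matrice.headD []).length - 2 * ((matrice.headD []).length / 3))))).sum) with hd
  by_cases e1 : a = 1 <;> by_cases e2 : b = 1 <;> by_cases e3 : c = 1 <;> by_cases e4 : d = 1 <;>
    simp [e1, e2, e3, e4]

-- B-side: a band-1 column segment only bumps the first counter …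
theorem pvSeg1 (t : Nat) (n2 i : Int) (row : List Int) (cols : List Nat)
    (st : Nat × Nat × Nat × Nat) (h : ∀ j ∈ cols, j < t) :
    cols.foldl (pvStep t n2 i row) st = (st.1 + pvG cols row, st.2.1, st.2.2.1, st.2.2.2) := by
  induction cols generalizing st with
  | nil => simp [pvG]
  | cons j cs ih =>
    have hj : j < t := h j (by simp)
    rw [List.foldl_cons]
    by_cases hz : row.getD j 1 = 0
    · rw [show pvStep t n2 i row st j = (st.1 + 1, st.2.1, st.2.2.1, st.2.2.2) from by
        unfold pvStep; rw [if_pos hz, if_pos hj]]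
      rw [ih _ (fun x hx => h x (by simp [hx])), pvG_cons_zero j cs row hz]
      simp [Prod.ext_iff]; omega
    · rw [show pvStep t n2 i row st j = st from by unfold pvStep; rw [if_neg hz]]
      rw [ih _ (fun x hx => h x (by simp [hx])), pvG_cons_nonzero j cs row hz]

-- … a band-2 segment bumps counter 2 or 3 according to the row half …
theorem pvSeg2 (t : Nat) (n2 i : Int) (row : List Int) (cols : List Nat)
    (st : Nat × Nat × Nat × Nat) (h : ∀ j ∈ cols, t ≤ j ∧ j < 2 * t) :
    cols.foldl (pvStep t n2 i row) st =
      (st.1, st.2.1 + (if i < n2 then pvG cols row else 0),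
       st.2.2.1 + (if i < n2 then 0 else pvG cols row), st.2.2.2) := by
  induction cols generalizing st with
  | nil => simp [pvG]
  | cons j cs ih =>
    obtain ⟨hj1, hj2⟩ := h j (by simp)
    rw [List.foldl_cons]
    by_cases hz : row.getD j 1 = 0
    · by_cases hi : i < n2
      · rw [show pvStep t n2 i row st j = (st.1, st.2.1 + 1, st.2.2.1, st.2.2.2) from by
          unfold pvStep; rw [if_pos hz, if_neg (by omega), if_pos hj2, if_pos hi]]
        rw [ih _ (fun x hx => h x (by simp [hx])), pvG_cons_zero j cs row hz]
        simp [Prod.ext_iff, hi]; omega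
      · rw [show pvStep t n2 i row st j = (st.1, st.2.1, st.2.2.1 + 1, st.2.2.2) from by
          unfold pvStep; rw [if_pos hz, if_neg (by omega), if_pos hj2, if_neg hi]]
        rw [ih _ (fun x hx => h x (by simp [hx])), pvG_cons_zero j cs row hz]
        simp [Prod.ext_iff, hi]; omega
    · rw [show pvStep t n2 i row st j = st from by unfold pvStep; rw [if_neg hz]]
      rw [ih _ (fun x hx => h x (by simp [hx])), pvG_cons_nonzero j cs row hz]

-- … and a band-3 segment only bumps the last counter.
theorem pvSeg3 (t : Nat) (n2 i : Int) (row : List Int) (cols : List Nat)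
    (st : Nat × Nat × Nat × Nat) (h : ∀ j ∈ cols, 2 * t ≤ j) :
    cols.foldl (pvStep t n2 i row) st = (st.1, st.2.1, st.2.2.1, st.2.2.2 + pvG cols row) := by
  induction cols generalizing st with
  | nil => simp [pvG]
  | cons j cs ih =>
    have hj : 2 * t ≤ j := h j (by simp)
    rw [List.foldl_cons]
    by_cases hz : row.getD j 1 = 0
    · rw [show pvStep t n2 i row st j = (st.1, st.2.1, st.2.2.1, st.2.2.2 + 1) from by
        unfold pvStep; rw [if_pos hz, if_neg (by omega), if_neg (by omega)]]
      rw [ih _ (fun x hx => h x (by simp [hx])), pvG_cons_zero j cs row hz]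
      simp [Prod.ext_iff]; omega
    · rw [show pvStep t n2 i row st j = st from by unfold pvStep; rw [if_neg hz]]
      rw [ih _ (fun x hx => h x (by simp [hx])), pvG_cons_nonzero j cs row hz]

-- one whole row of B's pass, split at the two band boundaries
theorem pvInnerB (m t : Nat) (h : 2 * t ≤ m) (n2 i : Int) (row : List Int)
    (st : Nat × Nat × Nat × Nat) :
    (List.range m).foldl (pvStep t n2 i row) st =
      (st.1 + pvG (List.range' 0 t) row,
       st.2.1 + (if i < n2 then pvG (List.range' t t) row else 0),
       st.2.2.1 + (if i < n2 then 0 else pvG (List.range' t t) row),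
       st.2.2.2 + pvG (List.range' (2 * t) (m - 2 * t)) row) := by
  have hm : List.range m = List.range' 0 t ++ List.range' t t ++ List.range' (2 * t) (m - 2 * t) := by
    rw [List.range_eq_range']
    have e1 : List.range' 0 t ++ List.range' (0 + t) t = List.range' 0 (t + t) :=
      List.range'_append_1
    have e2 : List.range' 0 (t + t) ++ List.range' (0 + (t + t)) (m - 2 * t)
        = List.range' 0 ((t + t) + (m - 2 * t)) := List.range'_append_1
    simp only [Nat.zero_add] at e1 e2
    conv_lhs => rw [show m = (t + t) + (m - 2 * t) from by omega]
    rw [← e2, ← e1, Nat.two_mul]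
  rw [hm, List.foldl_append, List.foldl_append,
    pvSeg1 t n2 i row (List.range' 0 t) st
      (by intro j hj; have := List.mem_range'_1.mp hj; omega),
    pvSeg2 t n2 i row (List.range' t t) _
      (by intro j hj; have := List.mem_range'_1.mp hj; omega),
    pvSeg3 t n2 i row (List.range' (2 * t) (m - 2 * t)) _
      (by intro j hj; have := List.mem_range'_1.mp hj; omega)]

-- B's whole pass, with symbolic start index and accumulators
theorem pvOuterB (m t : Nat) (h : 2 * t ≤ m) (n2 : Int) :
    ∀ (xs : List (List Int)) (s : Int) (st : Nat × Nat × Nat × Nat),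
    (PySem.List.enumerate xs s).foldl
        (fun st p => (List.range m).foldl (pvStep t n2 p.1 p.2) st) st =
      (st.1 + (xs.map (pvG (List.range' 0 t))).sum,
       st.2.1 + ((PySem.List.enumerate xs s).map
         (fun p => if p.1 < n2 then pvG (List.range' t t) p.2 else 0)).sum,
       st.2.2.1 + ((PySem.List.enumerate xs s).map
         (fun p => if p.1 < n2 then 0 else pvG (List.range' t t) p.2)).sum,
       st.2.2.2 + (xs.map (pvG (List.range' (2 * t) (m - 2 * t)))).sum) := by
  intro xs
  induction xs with
  | nil => intro s st; simp [PySem.List.enumerate_nil]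
  | cons r rs ih =>
    intro s st
    rw [PySem.List.enumerate_cons, List.foldl_cons, pvInnerB m t h, ih (s + 1)]
    by_cases hi : s < n2 <;> simp [hi] <;> omega

-- the middle-band contributions of the top half are exactly those of `take (k - s)` …
theorem pvEnumTake (g : List Int → Nat) (k : Nat) :
    ∀ (xs : List (List Int)) (s : Nat),
    ((PySem.List.enumerate xs (s : Int)).map
      (fun p => if p.1 < (k : Int) then g p.2 else 0)).sum = ((xs.take (k - s)).map g).sum := by
  intro xs
  induction xs with
  | nil => intro s; simp [PySem.List.enumerate_nil]
  | cons r rs ih =>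
    intro s
    rw [PySem.List.enumerate_cons, show ((s : Int) + 1) = ((s + 1 : Nat) : Int) from by push_cast; ring]
    by_cases hs : s < k
    · have hk : k - s = (k - (s + 1)) + 1 := by omega
      simp only [List.map_cons, List.sum_cons, hk, List.take_succ_cons, ih (s + 1)]
      simp [show ((s : Int) < (k : Int)) from by exact_mod_cast hs]
    · have hk : k - s = 0 := by omega
      have hk1 : k - (s + 1) = 0 := by omega
      simp only [List.map_cons, List.sum_cons, hk, List.take_zero, ih (s + 1), hk1]
      simp [show ¬((s : Int) < (k : Int)) from by exact_mod_cast hs]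

-- … and those of the bottom half are exactly those of `drop (k - s)`.
theorem pvEnumDrop (g : List Int → Nat) (k : Nat) :
    ∀ (xs : List (List Int)) (s : Nat),
    ((PySem.List.enumerate xs (s : Int)).map
      (fun p => if p.1 < (k : Int) then 0 else g p.2)).sum = ((xs.drop (k - s)).map g).sum := by
  intro xs
  induction xs with
  | nil => intro s; simp [PySem.List.enumerate_nil]
  | cons r rs ih =>
    intro s
    rw [PySem.List.enumerate_cons, show ((s : Int) + 1) = ((s + 1 : Nat) : Int) from by push_cast; ring]
    by_cases hs : s < k
    · have hk : k - s = (k - (s + 1)) + 1 := by omega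
      simp only [List.map_cons, List.sum_cons, hk, List.drop_succ_cons, ih (s + 1)]
      simp [show ((s : Int) < (k : Int)) from by exact_mod_cast hs]
    · have hk : k - s = 0 := by omega
      have hk1 : k - (s + 1) = 0 := by omega
      simp only [List.map_cons, List.sum_cons, hk, List.drop_zero, ih (s + 1), hk1]
      simp [show ¬((s : Int) < (k : Int)) from by exact_mod_cast hs]

theorem pvB_norm (matrice : List (List Int)) (h : matrice ≠ []) :
    bombainquattrosettori_alt matrice = pvCore matrice := by
  obtain ⟨x, xs, rfl⟩ := List.exists_cons_of_ne_nil h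
  simp only [bombainquattrosettori_alt]
  rw [show (0 : Int) = ((0 : Nat) : Int) from rfl]
  rw [pvOuterB ((x :: xs).headD []).length (((x :: xs).headD []).length / 3) (by omega)
    ((((x :: xs).length / 2 : Nat) : Int)) (x :: xs) ((0 : Nat) : Int)]
  rw [pvEnumTake, pvEnumDrop]
  simp only [Nat.sub_zero, Nat.zero_add]
  rfl

-- ===== VERDICT (by name: the statement is the Claim_ definition above) =====
theorem bombainquattrosettori_spec : Claim_equal_bombainquattrosettori := by
  intro matrice _ _
  unfold Spec_bombainquattrosettori
  cases matrice with
  | nil => decide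
  | cons x xs => rw [pvA_norm, pvB_norm _ (by simp)]
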